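-- pv_equiv track=rewrite | github.com/rastanton/PLASMAR | scripts/PLASMAR_Heatmap.py | Matrix_Matcher
-- ===== SOURCE A (Python) =====
-- def Matrix_Elements(input_list):
--     """Makes list of lists of matrix elements"""
--     Out = []
--     for entry1 in input_list:
--         Line = []
--         for entry2 in input_list:
--             Data = [entry1, entry2]
--             Line.append(Data)
--         Out.append(Line)
--     return Out
--
-- def Matrix_Matcher(input_list, element_matches, elements):
--     """Makes a matrix based on the linked data from an element list consisting of matches and data"""
--     Elements = Matrix_Elements(input_list)
--     Out = []
--     for line in Elements:
--         New = []
--         for entry in line: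
--             if entry[0] == entry[1]:
--                 New.append(1)
--             elif (entry in element_matches):
--                 Pos = element_matches.index(entry)
--                 New.append(elements[Pos])
--             elif ([entry[1], entry[0]] in element_matches):
--                 Pos = element_matches.index([entry[1], entry[0]])
--                 New.append(elements[Pos])
--             else:
--                 New.append(0)
--         Out.append(New)
--     return Out
-- ===== SOURCE B (Python) =====
-- def Matrix_Matcher(input_list, element_matches, elements):
--     """Paints the matrix instead of probing it: bucket the indices of each value,
--     zero-init an n x n grid, stamp reverse matches then forward matches last-to-first
--     (so forward beats reverse and the earliest listed match wins), and finally stamp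
--     1 on every value-equal cell."""
--     n = len(input_list)
--     where = {}
--     for i, v in enumerate(input_list):
--         where.setdefault(v, []).append(i)
--     M = [[0] * n for _ in range(n)]
--     pairs = list(zip(element_matches, elements))
--     for m, val in reversed(pairs):          # reverse-direction stamps first
--         if len(m) == 2:
--             for i in where.get(m[1], []):
--                 for j in where.get(m[0], []):
--                     M[i][j] = val
--     for m, val in reversed(pairs):          # forward stamps override reverse
--         if len(m) == 2:
--             for i in where.get(m[0], []):
--                 for j in where.get(m[1], []):
--                     M[i][j] = val
--     for i, a in enumerate(input_list):      # value-equality rule dominates all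
--         for j, b in enumerate(input_list):
--             if a == b:
--                 M[i][j] = 1
--     return M
-- ===== Notes on version B (the rewrite author's own statement) =====
-- stated objective: faster
-- what changed: B inverts the control flow: instead of A's per-cell scans over element_matches, it buckets the indices of each value once, zero-initialises the n x n grid, then paints cells by iterating the matches themselves (reverse stamps, then forward stamps, last-to-first so forward beats reverse and the earliest match wins), and finally stamps 1 on every value-equal cell.
import Mathlib
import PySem

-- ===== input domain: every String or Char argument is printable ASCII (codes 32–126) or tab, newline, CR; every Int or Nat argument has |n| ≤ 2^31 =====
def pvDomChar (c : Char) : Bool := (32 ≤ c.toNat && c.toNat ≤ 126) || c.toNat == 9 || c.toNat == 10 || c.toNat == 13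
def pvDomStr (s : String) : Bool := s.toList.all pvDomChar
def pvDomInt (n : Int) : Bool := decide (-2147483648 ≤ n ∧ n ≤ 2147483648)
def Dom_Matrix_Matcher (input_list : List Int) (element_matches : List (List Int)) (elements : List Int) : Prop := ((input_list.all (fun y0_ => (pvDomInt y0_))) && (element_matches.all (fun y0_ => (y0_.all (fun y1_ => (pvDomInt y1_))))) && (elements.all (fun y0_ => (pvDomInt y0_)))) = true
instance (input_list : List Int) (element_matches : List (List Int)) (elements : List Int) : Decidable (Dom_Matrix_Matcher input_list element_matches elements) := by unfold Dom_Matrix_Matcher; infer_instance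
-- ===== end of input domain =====

-- B paints the matrix instead of probing it: value->indices buckets, a zero grid, reverse
-- then forward stamping passes last-to-first, and a final equality pass; objective: faster.


-- ===== PORT A =====
def Matrix_Elements (input_list : List Int) : List (List (List Int)) :=
  input_list.foldl (fun Out entry1 =>
    Out ++ [input_list.foldl (fun Line entry2 => Line ++ [[entry1, entry2]]) []]) []

-- the body of A's inner loop ('entry' is one [entry1, entry2] pair as a list)
def aCell (element_matches : List (List Int)) (elements : List Int) (entry : List Int) : Int :=
  let e0 := (PySem.List.pyGet? entry 0).getD 0   -- entry[0]; always in range here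
  let e1 := (PySem.List.pyGet? entry 1).getD 0   -- entry[1]
  if e0 = e1 then 1
  else if entry ∈ element_matches then
    match PySem.List.index? element_matches entry with
    | some pos => (PySem.List.pyGet? elements (pos : Int)).getD 0   -- elements[Pos]; in range under Pre_
    | none => 0
  else if [e1, e0] ∈ element_matches then
    match PySem.List.index? element_matches [e1, e0] with
    | some pos => (PySem.List.pyGet? elements (pos : Int)).getD 0
    | none => 0
  else 0

def Matrix_Matcher (input_list : List Int) (element_matches : List (List Int)) (elements : List Int) : List (List Int) :=
  let Elements := Matrix_Elements input_list
  Elements.foldl (fun Out line =>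
    Out ++ [line.foldl (fun New entry => New ++ [aCell element_matches elements entry]) []]) []

-- ===== PORT B =====
-- where.setdefault(v, []).append(i), iterating enumerate(input_list)
def bBuckets (input_list : List Int) : PySem.Dict Int (List Int) :=
  (PySem.List.enumerate input_list).foldl
    (fun d p => d.modify p.2 [] (fun idxs => idxs ++ [p.1])) PySem.Dict.empty

-- the nested 'for i in rows: for j in cols: M[i][j] = v' stamp; i, j are enumerate
-- indices, hence ≥ 0, so '.toNat' is exact for Python's nonnegative M[i][j] indexing
def bStamp (M : List (List Int)) (rows cols : List Int) (v : Int) : List (List Int) :=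
  rows.foldl (fun M i =>
    cols.foldl (fun M j => M.modify i.toNat (fun row => row.set j.toNat v)) M) M

def Matrix_Matcher_alt (input_list : List Int) (element_matches : List (List Int)) (elements : List Int) : List (List Int) :=
  let n := input_list.length
  let w := bBuckets input_list
  let M0 := List.replicate n (List.replicate n (0 : Int))
  let pairs := element_matches.zip elements
  let M1 := pairs.reverse.foldl (fun M mv =>
    match mv.1 with
    | [x, y] => bStamp M (w.getD y []) (w.getD x []) mv.2
    | _ => M) M0
  let M2 := pairs.reverse.foldl (fun M mv =>
    match mv.1 with
    | [x, y] => bStamp M (w.getD x []) (w.getD y []) mv.2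
    | _ => M) M1
  (PySem.List.enumerate input_list).foldl (fun M ia =>
    (PySem.List.enumerate input_list).foldl (fun M jb =>
      if ia.2 = jb.2 then M.modify ia.1.toNat (fun row => row.set jb.1.toNat 1) else M) M) M2

-- ===== PRECONDITION & SPEC =====
-- Pre_ excludes exactly the inputs on which A raises IndexError: some off-diagonal cell
-- (a, b) whose first forward match [a,b] (or, failing that, reverse match [b,a]) sits at an
-- index ≥ len(elements), so A's elements[Pos] is out of range.
def Pre_Matrix_Matcher (input_list : List Int) (element_matches : List (List Int)) (elements : List Int) : Prop :=
  ∀ a ∈ input_list, ∀ b ∈ input_list, a ≠ b →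
    ((PySem.List.index? element_matches [a, b]).or (PySem.List.index? element_matches [b, a])).getD 0 < elements.length ∨
    ((PySem.List.index? element_matches [a, b]).or (PySem.List.index? element_matches [b, a])) = none
instance (input_list : List Int) (element_matches : List (List Int)) (elements : List Int) : Decidable (Pre_Matrix_Matcher input_list element_matches elements) := by unfold Pre_Matrix_Matcher; infer_instance

def pvWitness_Matrix_Matcher : List Int × List (List Int) × List Int := ([1, 2, 3], [[1, 2], [3, 1]], [5, 7])

def Spec_Matrix_Matcher (input_list : List Int) (element_matches : List (List Int)) (elements : List Int) (out : List (List Int)) : Prop := out = Matrix_Matcher_alt input_list element_matches elements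
instance (input_list : List Int) (element_matches : List (List Int)) (elements : List Int) (out : List (List Int)) : Decidable (Spec_Matrix_Matcher input_list element_matches elements out) := by unfold Spec_Matrix_Matcher; infer_instance

-- ===== CLAIM (what is proved, stated in full; the proofs are below) =====
def Claim_equal_Matrix_Matcher : Prop := ∀ (input_list : List Int) (element_matches : List (List Int)) (elements : List Int), Dom_Matrix_Matcher input_list element_matches elements → Pre_Matrix_Matcher input_list element_matches elements → Spec_Matrix_Matcher input_list element_matches elements (Matrix_Matcher input_list element_matches elements)

-- ===== LEMMAS AND PROOFS =====

-- cell reader for the proofs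
def gM (M : List (List Int)) (i j : Nat) : Option Int := M[i]?.bind (fun r => r[j]?)

-- n×n shape invariant
def SH (n : Nat) (M : List (List Int)) : Prop := M.length = n ∧ ∀ r ∈ M, r.length = n

-- first value among (match, val) pairs whose match is the length-2 list [k.1, k.2]
def lookFirst : List (List Int × Int) → (Int × Int) → Option Int
  | [], _ => none
  | (m, v) :: rest, k =>
    match m with
    | [a, b] => if k = (a, b) then some v else lookFirst rest k
    | _ => lookFirst rest k

lemma lookFirst_zip (em : List (List Int)) (el : List Int) (a b : Int) :
    lookFirst (em.zip el) (a, b) =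
      (PySem.List.index? em [a, b]).bind (fun pos => el[pos]?) := by
  induction em generalizing el with
  | nil => simp [lookFirst, PySem.List.index?]
  | cons m em' ih =>
    cases el with
    | nil =>
      simp only [List.zip_nil_right, lookFirst]
      rcases PySem.List.index? (m :: em') [a, b] with _ | pos <;> simp
    | cons e el' =>
      by_cases hm : m = [a, b]
      · subst hm
        rw [PySem.List.index?_cons_self]
        simp [lookFirst, List.zip_cons_cons]
      · rw [PySem.List.index?_cons_of_ne em' hm]
        have tail : lookFirst ((m, e) :: em'.zip el') (a, b) = lookFirst (em'.zip el') (a, b) := by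
          match m with
          | [] => rfl
          | [x] => rfl
          | [x, y] =>
            have : (a, b) ≠ (x, y) := by
              intro hxy
              exact hm (by cases hxy; rfl)
            simp [lookFirst, this]
          | x :: y :: z :: t => rfl
        rw [List.zip_cons_cons, tail, ih el']
        rcases PySem.List.index? em' [a, b] with _ | pos <;> simp

-- B's cell value, as a closed form
def bCell (em : List (List Int)) (el : List Int) (a b : Int) : Int :=
  if a = b then 1
  else (lookFirst (em.zip el) (a, b)).getD ((lookFirst (em.zip el) (b, a)).getD 0)

lemma cell_eq (em : List (List Int)) (el : List Int) (a b : Int)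
    (hgood : a ≠ b →
      ((PySem.List.index? em [a, b]).or (PySem.List.index? em [b, a])).getD 0 < el.length ∨
      ((PySem.List.index? em [a, b]).or (PySem.List.index? em [b, a])) = none) :
    aCell em el [a, b] = bCell em el a b := by
  unfold aCell bCell
  simp only [PySem.List.pyGet?_zero_cons, Option.getD_some]
  have h1 : PySem.List.pyGet? [a, b] 1 = some b := by
    simp [PySem.List.pyGet?, PySem.List.pyIdx?]
  rw [h1]
  simp only [Option.getD_some]
  by_cases hab : a = b
  · simp [hab]
  · simp only [hab, if_false]
    have hgood' := hgood hab
    rw [lookFirst_zip em el a b, lookFirst_zip em el b a]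
    rcases hmf : PySem.List.index? em [a, b] with _ | pos
    · rw [hmf, Option.none_or] at hgood'
      have hnot : [a, b] ∉ em := (PySem.List.index?_eq_none_iff em [a, b]).1 hmf
      rw [if_neg hnot]
      rcases hmr : PySem.List.index? em [b, a] with _ | pos
      · have hnot' : [b, a] ∉ em := (PySem.List.index?_eq_none_iff em [b, a]).1 hmr
        rw [if_neg hnot']
        simp
      · rw [hmr] at hgood'
        have hlt : pos < el.length := by
          rcases hgood' with h' | h'
          · simpa using h'
          · simp at h'
        have hmem' : [b, a] ∈ em := (PySem.List.index?_isSome_iff em [b, a]).1 (by rw [hmr]; rfl)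
        rw [if_pos hmem']
        simp [PySem.List.pyGet?_natCast, List.getElem?_eq_getElem hlt]
    · rw [hmf] at hgood'
      have hlt : pos < el.length := by
        rcases hgood' with h' | h'
        · simpa using h'
        · simp at h'
      have hmem : [a, b] ∈ em := (PySem.List.index?_isSome_iff em [a, b]).1 (by rw [hmf]; rfl)
      rw [if_pos hmem]
      simp [PySem.List.pyGet?_natCast, List.getElem?_eq_getElem hlt]

-- ===== A-side characterisation =====
lemma matrix_elements_eq (input_list : List Int) :
    Matrix_Elements input_list =
      input_list.map (fun a => input_list.map (fun b => [a, b])) := by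
  unfold Matrix_Elements
  rw [PySem.List.foldl_append_singleton_eq_map]
  refine (List.nil_append _).symm ▸ ?_
  apply List.map_congr_left
  intro a _
  rw [PySem.List.foldl_append_singleton_eq_map]
  simp

lemma matcher_eq_map (input_list : List Int) (em : List (List Int)) (el : List Int) :
    Matrix_Matcher input_list em el =
      input_list.map (fun a => input_list.map (fun b => aCell em el [a, b])) := by
  unfold Matrix_Matcher
  rw [matrix_elements_eq, PySem.List.foldl_append_singleton_eq_map, List.nil_append,
      List.map_map]
  apply List.map_congr_left
  intro a _
  simp only [Function.comp]
  rw [PySem.List.foldl_append_singleton_eq_map, List.nil_append, List.map_map]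
  rfl

-- ===== B-side: buckets =====
lemma bBuckets_getD (l : List Int) (v : Int) :
    (bBuckets l).getD v [] =
      (((PySem.List.enumerate l).map Prod.swap).filter (fun p => p.1 == v)).map (·.2) := by
  unfold bBuckets
  have := PySem.Dict.getD_foldl_modify_append
    ((PySem.List.enumerate l).map Prod.swap) (PySem.Dict.empty (κ := Int) (ν := List Int)) v
  rw [List.foldl_map] at this
  simpa [Prod.swap] using this

lemma mem_bucket_iff (l : List Int) (v : Int) (k : Nat) (hk : k < l.length) :
    ((k : Int) ∈ (bBuckets l).getD v []) ↔ l[k] = v := by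
  rw [bBuckets_getD]
  constructor
  · intro hmem
    obtain ⟨p, hpf, hpe⟩ := List.mem_map.1 hmem
    obtain ⟨hp, hv⟩ := List.mem_filter.1 hpf
    obtain ⟨q, hq, rfl⟩ := List.mem_map.1 hp
    obtain ⟨m, hm, rfl⟩ := (PySem.List.mem_enumerate_iff l 0 q).1 hq
    rw [beq_iff_eq] at hv
    simp only [Prod.swap] at hv hpe
    have : m = k := by omega
    subst this
    simpa using hv
  · intro hv
    refine List.mem_map.2 ⟨(v, (k : Int)), List.mem_filter.2 ⟨List.mem_map.2
      ⟨((k : Int), v), ?_, rfl⟩, by simp⟩, rfl⟩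
    exact (PySem.List.mem_enumerate_iff l 0 _).2 ⟨k, hk, by simp [hv]⟩

lemma bucket_nonneg (l : List Int) (v iI : Int) (h : iI ∈ (bBuckets l).getD v []) : 0 ≤ iI := by
  rw [bBuckets_getD] at h
  obtain ⟨p, hpf, hpe⟩ := List.mem_map.1 h
  obtain ⟨hp, _⟩ := List.mem_filter.1 hpf
  obtain ⟨q, hq, rfl⟩ := List.mem_map.1 hp
  obtain ⟨m, _, rfl⟩ := (PySem.List.mem_enumerate_iff l 0 q).1 hq
  simp only [Prod.swap] at hpe
  omega

lemma exists_bucket_iff (l : List Int) (v : Int) (i' : Nat) (hi : i' < l.length) :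
    (∃ iI ∈ (bBuckets l).getD v [], iI.toNat = i') ↔ l[i'] = v := by
  constructor
  · rintro ⟨iI, hmem, rfl⟩
    have h0 : 0 ≤ iI := bucket_nonneg l v iI hmem
    have heq : iI = ((iI.toNat : Nat) : Int) := by omega
    rw [heq] at hmem
    exact (mem_bucket_iff l v iI.toNat (by omega)).1 hmem
  · intro hv
    exact ⟨(i' : Int), (mem_bucket_iff l v i' hi).2 hv, Int.toNat_natCast i'⟩

-- ===== B-side: shape =====
lemma SH_modify (n : Nat) (M : List (List Int)) (h : SH n M) (i j : Nat) (v : Int) :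
    SH n (M.modify i (fun row => row.set j v)) := by
  obtain ⟨hl, hr⟩ := h
  refine ⟨by simpa using hl, ?_⟩
  intro r hrm
  rcases List.mem_iff_getElem?.1 hrm with ⟨k, hk⟩
  rw [List.getElem?_modify] at hk
  rcases hM : M[k]? with _ | r0
  · rw [hM] at hk; simp at hk
  · rw [hM] at hk
    have hr0 : r0.length = n := hr r0 (List.mem_of_getElem? hM)
    by_cases hik : i = k <;> simp [hik] at hk <;> simp [← hk, hr0]

lemma SH_foldl {α : Type} (n : Nat) (f : List (List Int) → α → List (List Int)) (l : List α)
    (hf : ∀ M x, SH n M → SH n (f M x)) :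
    ∀ M, SH n M → SH n (l.foldl f M) := by
  induction l with
  | nil => exact fun M h => h
  | cons x xs ih => exact fun M h => ih (f M x) (hf M x h)

lemma SH_stamp (n : Nat) (rows cols : List Int) (v : Int) (M : List (List Int)) (h : SH n M) :
    SH n (bStamp M rows cols v) := by
  unfold bStamp
  refine SH_foldl n _ rows (fun M i hM => ?_) M h
  exact SH_foldl n _ cols (fun M j hM => SH_modify n M hM i.toNat j.toNat v) M hM

lemma SH_zero (n : Nat) : SH n (List.replicate n (List.replicate n (0 : Int))) := by
  refine ⟨by simp, ?_⟩
  intro r hr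
  rw [List.eq_of_mem_replicate hr]
  simp

-- ===== B-side: pointwise stamping =====
lemma gM_modify_set (n : Nat) (M : List (List Int)) (h : SH n M)
    (i j i' j' : Nat) (hi' : i' < n) (hj' : j' < n) (v : Int) :
    gM (M.modify i (fun row => row.set j v)) i' j' =
      if i = i' ∧ j = j' then some v else gM M i' j' := by
  unfold gM
  rw [List.getElem?_modify]
  rcases hM : M[i']? with _ | r
  · exact absurd (List.getElem?_eq_none_iff.1 hM) (by have := h.1; omega)
  · have hr : r.length = n := h.2 r (List.mem_of_getElem? hM)
    simp only [Option.map_eq_map, Option.map_some, Option.bind_some]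
    by_cases hii : i = i'
    · rw [if_pos hii, List.getElem?_set]
      by_cases hjj : j = j'
      · simp [hjj, hr, hj', hii]
      · simp [hjj]
    · rw [if_neg hii, if_neg (fun hc => hii hc.1)]

lemma gM_colfold (n : Nat) (cols : List Int) (rowIdx : Nat) (v : Int)
    (M : List (List Int)) (h : SH n M) (i' j' : Nat) (hi' : i' < n) (hj' : j' < n) :
    gM (cols.foldl (fun M j => M.modify rowIdx (fun row => row.set j.toNat v)) M) i' j' =
      if rowIdx = i' ∧ (∃ jI ∈ cols, jI.toNat = j') then some v else gM M i' j' := by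
  induction cols generalizing M with
  | nil => simp
  | cons j cs ihc =>
    rw [List.foldl_cons, ihc _ (SH_modify n M h rowIdx j.toNat v),
        gM_modify_set n M h rowIdx j.toNat i' j' hi' hj' v]
    by_cases h1 : rowIdx = i' ∧ ∃ jI ∈ cs, jI.toNat = j'
    · simp [h1]
    · rw [if_neg h1]
      by_cases h2 : rowIdx = i' ∧ j.toNat = j'
      · simp [h2]
      · rw [if_neg h2, if_neg]
        rintro ⟨ha, jI, hjm, hje⟩
        rcases List.mem_cons.1 hjm with rfl | hm
        · exact h2 ⟨ha, hje⟩
        · exact h1 ⟨ha, jI, hm, hje⟩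

lemma gM_stamp (n : Nat) (rows cols : List Int) (v : Int) (M : List (List Int)) (h : SH n M)
    (i' j' : Nat) (hi' : i' < n) (hj' : j' < n) :
    gM (bStamp M rows cols v) i' j' =
      if (∃ iI ∈ rows, iI.toNat = i') ∧ (∃ jI ∈ cols, jI.toNat = j') then some v
      else gM M i' j' := by
  unfold bStamp
  induction rows generalizing M with
  | nil => simp
  | cons i rs ihr =>
    rw [List.foldl_cons,
        ihr _ (SH_foldl n _ cols (fun M j hM => SH_modify n M hM i.toNat j.toNat v) M h),
        gM_colfold n cols i.toNat v M h i' j' hi' hj']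
    by_cases hrest : (∃ iI ∈ rs, iI.toNat = i') ∧ ∃ jI ∈ cols, jI.toNat = j'
    · rw [if_pos hrest, if_pos ⟨⟨hrest.1.choose, List.mem_cons_of_mem _ hrest.1.choose_spec.1,
        hrest.1.choose_spec.2⟩, hrest.2⟩]
    · rw [if_neg hrest]
      by_cases hhead : i.toNat = i' ∧ ∃ jI ∈ cols, jI.toNat = j'
      · rw [if_pos hhead, if_pos ⟨⟨i, List.mem_cons_self, hhead.1⟩, hhead.2⟩]
      · rw [if_neg hhead, if_neg]
        rintro ⟨⟨iI, him, hie⟩, hcols⟩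
        rcases List.mem_cons.1 him with rfl | hm
        · exact hhead ⟨hie, hcols⟩
        · exact hrest ⟨⟨iI, hm, hie⟩, hcols⟩

-- the reverse-direction stamping pass, pointwise
lemma gM_passRev (n : Nat) (l : List Int) (hn : n = l.length) (pairs : List (List Int × Int))
    (M : List (List Int)) (h : SH n M) (i' j' : Nat) (hi' : i' < n) (hj' : j' < n) :
    gM (pairs.reverse.foldl (fun M mv =>
      match mv.1 with
      | [x, y] => bStamp M ((bBuckets l).getD y []) ((bBuckets l).getD x []) mv.2
      | _ => M) M) i' j' =
      match lookFirst pairs (l[j']'(by omega), l[i']'(by omega)) with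
      | some v => some v
      | none => gM M i' j' := by
  rw [List.foldl_reverse]
  induction pairs generalizing M with
  | nil => simp [lookFirst]
  | cons mv rest ih =>
    rw [List.foldr_cons]
    rcases mv with ⟨m, v⟩
    have hSH : SH n (List.foldr (fun x y =>
        match x.1 with
        | [a, b] => bStamp y ((bBuckets l).getD b []) ((bBuckets l).getD a []) x.2
        | _ => y) M rest) := by
      rw [← List.foldl_reverse]
      refine SH_foldl n _ rest.reverse (fun M mv hM => ?_) M h
      rcases mv with ⟨m, v⟩
      match m with
      | [] => exact hM
      | [x] => exact hM
      | [x, y] => exact SH_stamp n _ _ v _ hM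
      | x :: y :: z :: t => exact hM
    match m with
    | [] => rw [ih M h]; rfl
    | [x] => rw [ih M h]; rfl
    | x :: y :: z :: t => rw [ih M h]; rfl
    | [x, y] =>
      show gM (bStamp _ _ _ v) i' j' = _
      rw [gM_stamp n _ _ v _ hSH i' j' hi' hj']
      simp only [exists_bucket_iff l y i' (by omega : i' < l.length),
        exists_bucket_iff l x j' (by omega : j' < l.length), lookFirst]
      by_cases hk : (l[j']'(by omega), l[i']'(by omega)) = ((x : Int), (y : Int))
      · rw [if_pos ⟨congrArg Prod.snd hk, congrArg Prod.fst hk⟩, if_pos hk]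
      · rw [if_neg (fun hc => hk (Prod.ext hc.2 hc.1)), if_neg hk, ih M h]

-- the forward-direction stamping pass, pointwise
lemma gM_passFwd (n : Nat) (l : List Int) (hn : n = l.length) (pairs : List (List Int × Int))
    (M : List (List Int)) (h : SH n M) (i' j' : Nat) (hi' : i' < n) (hj' : j' < n) :
    gM (pairs.reverse.foldl (fun M mv =>
      match mv.1 with
      | [x, y] => bStamp M ((bBuckets l).getD x []) ((bBuckets l).getD y []) mv.2
      | _ => M) M) i' j' =
      match lookFirst pairs (l[i']'(by omega), l[j']'(by omega)) with
      | some v => some v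
      | none => gM M i' j' := by
  rw [List.foldl_reverse]
  induction pairs generalizing M with
  | nil => simp [lookFirst]
  | cons mv rest ih =>
    rw [List.foldr_cons]
    rcases mv with ⟨m, v⟩
    have hSH : SH n (List.foldr (fun x y =>
        match x.1 with
        | [a, b] => bStamp y ((bBuckets l).getD a []) ((bBuckets l).getD b []) x.2
        | _ => y) M rest) := by
      rw [← List.foldl_reverse]
      refine SH_foldl n _ rest.reverse (fun M mv hM => ?_) M h
      rcases mv with ⟨m, v⟩
      match m with
      | [] => exact hM
      | [x] => exact hM
      | [x, y] => exact SH_stamp n _ _ v _ hM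
      | x :: y :: z :: t => exact hM
    match m with
    | [] => rw [ih M h]; rfl
    | [x] => rw [ih M h]; rfl
    | x :: y :: z :: t => rw [ih M h]; rfl
    | [x, y] =>
      show gM (bStamp _ _ _ v) i' j' = _
      rw [gM_stamp n _ _ v _ hSH i' j' hi' hj']
      simp only [exists_bucket_iff l x i' (by omega : i' < l.length),
        exists_bucket_iff l y j' (by omega : j' < l.length), lookFirst]
      by_cases hk : (l[i']'(by omega), l[j']'(by omega)) = ((x : Int), (y : Int))
      · rw [if_pos ⟨congrArg Prod.fst hk, congrArg Prod.snd hk⟩, if_pos hk]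
      · rw [if_neg (fun hc => hk (Prod.ext hc.1 hc.2)), if_neg hk, ih M h]

-- final equality pass, pointwise
lemma gM_diag_inner (n : Nat) (ps : List (Int × Int)) (rowIdx : Nat) (a : Int)
    (M : List (List Int)) (h : SH n M) (i' j' : Nat) (hi' : i' < n) (hj' : j' < n) :
    gM (ps.foldl (fun M jb =>
        if a = jb.2 then M.modify rowIdx (fun row => row.set jb.1.toNat 1) else M) M) i' j' =
      if rowIdx = i' ∧ (∃ p ∈ ps, a = p.2 ∧ p.1.toNat = j') then some 1 else gM M i' j' := by
  induction ps generalizing M with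
  | nil => simp
  | cons p ps ih =>
    rw [List.foldl_cons]
    by_cases hap : a = p.2
    · rw [if_pos hap, ih _ (SH_modify n M h rowIdx p.1.toNat 1),
          gM_modify_set n M h rowIdx p.1.toNat i' j' hi' hj' 1]
      by_cases h1 : rowIdx = i' ∧ ∃ q ∈ ps, a = q.2 ∧ q.1.toNat = j'
      · simp [h1]
      · rw [if_neg h1]
        by_cases h2 : rowIdx = i' ∧ p.1.toNat = j'
        · simp [h2, hap]
        · rw [if_neg h2, if_neg]
          rintro ⟨ha, q, hqm, hqa, hqe⟩
          rcases List.mem_cons.1 hqm with rfl | hm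
          · exact h2 ⟨ha, hqe⟩
          · exact h1 ⟨ha, q, hm, hqa, hqe⟩
    · rw [if_neg hap, ih _ h]
      by_cases h1 : rowIdx = i' ∧ ∃ q ∈ ps, a = q.2 ∧ q.1.toNat = j'
      · rw [if_pos h1, if_pos ⟨h1.1, h1.2.choose, List.mem_cons_of_mem _ h1.2.choose_spec.1,
          h1.2.choose_spec.2⟩]
      · rw [if_neg h1, if_neg]
        rintro ⟨ha, q, hqm, hqa, hqe⟩
        rcases List.mem_cons.1 hqm with rfl | hm
        · exact hap hqa
        · exact h1 ⟨ha, q, hm, hqa, hqe⟩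

lemma SH_diag_inner (n : Nat) (ps : List (Int × Int)) (rowIdx : Nat) (a : Int)
    (M : List (List Int)) (h : SH n M) :
    SH n (ps.foldl (fun M jb =>
      if a = jb.2 then M.modify rowIdx (fun row => row.set jb.1.toNat 1) else M) M) := by
  refine SH_foldl n _ ps (fun M jb hM => ?_) M h
  by_cases hap : a = jb.2
  · rw [if_pos hap]; exact SH_modify n M hM rowIdx jb.1.toNat 1
  · rw [if_neg hap]; exact hM

lemma exists_enum_iff (l : List Int) (a : Int) (j' : Nat) (hj' : j' < l.length) :
    (∃ p ∈ PySem.List.enumerate l 0, a = p.2 ∧ p.1.toNat = j') ↔ a = l[j'] := by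
  constructor
  · rintro ⟨p, hp, ha, he⟩
    rcases (PySem.List.mem_enumerate_iff l 0 p).1 hp with ⟨k, hk, rfl⟩
    simp only at ha he
    have : k = j' := by omega
    subst this
    exact ha
  · intro ha
    exact ⟨((j' : Int), l[j']), (PySem.List.mem_enumerate_iff l 0 _).2 ⟨j', hj', by simp⟩,
      ha, by simp⟩

lemma gM_diag (n : Nat) (l : List Int) (hn : n = l.length) (qs : List (Int × Int))
    (M : List (List Int)) (h : SH n M) (i' j' : Nat) (hi' : i' < n) (hj' : j' < n) :
    gM (qs.foldl (fun M ia =>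
        (PySem.List.enumerate l).foldl (fun M jb =>
          if ia.2 = jb.2 then M.modify ia.1.toNat (fun row => row.set jb.1.toNat 1) else M) M) M) i' j' =
      if ∃ q ∈ qs, q.1.toNat = i' ∧ q.2 = l[j']'(by omega) then some 1 else gM M i' j' := by
  induction qs generalizing M with
  | nil => simp
  | cons q qs ih =>
    rw [List.foldl_cons, ih _ (SH_diag_inner n _ q.1.toNat q.2 M h),
        gM_diag_inner n _ q.1.toNat q.2 M h i' j' hi' hj']
    simp only [exists_enum_iff l q.2 j' (by omega : j' < l.length)]
    by_cases h1 : ∃ r ∈ qs, r.1.toNat = i' ∧ r.2 = l[j']'(by omega)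
    · rw [if_pos h1, if_pos ⟨h1.choose, List.mem_cons_of_mem _ h1.choose_spec.1,
        h1.choose_spec.2⟩]
    · rw [if_neg h1]
      by_cases h2 : q.1.toNat = i' ∧ q.2 = l[j']'(by omega)
      · simp [h2.1, h2.2]
      · rw [if_neg (fun hc => h2 ⟨hc.1, hc.2⟩), if_neg]
        rintro ⟨r, hrm, hre⟩
        rcases List.mem_cons.1 hrm with rfl | hm
        · exact h2 hre
        · exact h1 ⟨r, hm, hre⟩

lemma exists_enum_diag_iff (l : List Int) (i' j' : Nat) (hi' : i' < l.length) (hj' : j' < l.length) :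
    (∃ q ∈ PySem.List.enumerate l 0, q.1.toNat = i' ∧ q.2 = l[j']) ↔ l[i'] = l[j'] := by
  constructor
  · rintro ⟨q, hq, he, ha⟩
    rcases (PySem.List.mem_enumerate_iff l 0 q).1 hq with ⟨k, hk, rfl⟩
    simp only at he ha
    have : k = i' := by omega
    subst this
    exact ha
  · intro ha
    exact ⟨((i' : Int), l[i']), (PySem.List.mem_enumerate_iff l 0 _).2 ⟨i', hi', by simp⟩,
      by simp, ha⟩

lemma SH_passR (n : Nat) (l : List Int) (pairs : List (List Int × Int))
    (M : List (List Int)) (h : SH n M) :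
    SH n (pairs.foldl (fun (M : List (List Int)) (mv : List Int × Int) =>
      match mv.1 with
      | [x, y] => bStamp M ((bBuckets l).getD y []) ((bBuckets l).getD x []) mv.2
      | _ => M) M) := by
  induction pairs generalizing M with
  | nil => exact h
  | cons mv rest ih =>
    rw [List.foldl_cons]
    refine ih _ ?_
    rcases mv with ⟨m, v⟩
    match m with
    | [] => exact h
    | [x] => exact h
    | [x, y] => exact SH_stamp n _ _ v _ h
    | x :: y :: z :: t => exact h

lemma SH_passF (n : Nat) (l : List Int) (pairs : List (List Int × Int))
    (M : List (List Int)) (h : SH n M) :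
    SH n (pairs.foldl (fun (M : List (List Int)) (mv : List Int × Int) =>
      match mv.1 with
      | [x, y] => bStamp M ((bBuckets l).getD x []) ((bBuckets l).getD y []) mv.2
      | _ => M) M) := by
  induction pairs generalizing M with
  | nil => exact h
  | cons mv rest ih =>
    rw [List.foldl_cons]
    refine ih _ ?_
    rcases mv with ⟨m, v⟩
    match m with
    | [] => exact h
    | [x] => exact h
    | [x, y] => exact SH_stamp n _ _ v _ h
    | x :: y :: z :: t => exact h

-- B's matrix, pointwise
lemma alt_cell (l : List Int) (em : List (List Int)) (el : List Int)
    (i' j' : Nat) (hi' : i' < l.length) (hj' : j' < l.length) :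
    gM (Matrix_Matcher_alt l em el) i' j' = some (bCell em el l[i'] l[j']) := by
  simp only [Matrix_Matcher_alt]
  have hSH1 := SH_passR l.length l (em.zip el).reverse
    (List.replicate l.length (List.replicate l.length (0 : Int))) (SH_zero l.length)
  have hSH2 := SH_passF l.length l (em.zip el).reverse _ hSH1
  rw [gM_diag l.length l rfl _ _ hSH2 i' j' hi' hj']
  simp only [exists_enum_diag_iff l i' j' hi' hj']
  rw [gM_passFwd l.length l rfl (em.zip el) _ hSH1 i' j' hi' hj',
      gM_passRev l.length l rfl (em.zip el) _ (SH_zero l.length) i' j' hi' hj']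
  unfold bCell
  have hzero : gM (List.replicate l.length (List.replicate l.length (0 : Int))) i' j' = some 0 := by
    unfold gM
    rw [List.getElem?_replicate_of_lt hi', Option.bind_some,
        List.getElem?_replicate_of_lt hj']
  by_cases hd : l[i'] = l[j']
  · simp [hd]
  · rw [if_neg hd, if_neg hd]
    rcases lookFirst (em.zip el) (l[i'], l[j']) with _ | v
    · rcases lookFirst (em.zip el) (l[j'], l[i']) with _ | w
      · simp [hzero]
      · simp
    · simp

lemma SH_alt (l : List Int) (em : List (List Int)) (el : List Int) :
    SH l.length (Matrix_Matcher_alt l em el) := by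
  simp only [Matrix_Matcher_alt]
  refine SH_foldl l.length _ (PySem.List.enumerate l)
    (fun M q hM => SH_diag_inner l.length _ q.1.toNat q.2 M hM) _ ?_
  exact SH_passF l.length l (em.zip el).reverse _
    (SH_passR l.length l (em.zip el).reverse
      (List.replicate l.length (List.replicate l.length (0 : Int))) (SH_zero l.length))

-- ===== VERDICT (by name: the statement is the Claim_ definition above) =====
theorem Matrix_Matcher_spec : Claim_equal_Matrix_Matcher := by
  intro l em el _ hpre
  unfold Spec_Matrix_Matcher
  rw [matcher_eq_map l em el]
  have hA : ∀ i' : Nat, (hi' : i' < l.length) → ∀ j' : Nat, (hj' : j' < l.length) →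
      gM (Matrix_Matcher_alt l em el) i' j' = some (aCell em el [l[i'], l[j']]) := by
    intro i' hi' j' hj'
    rw [alt_cell l em el i' j' hi' hj',
        cell_eq em el l[i'] l[j'] (hpre l[i'] (l.getElem_mem hi') l[j'] (l.getElem_mem hj'))]
  obtain ⟨hlen, hrows⟩ := SH_alt l em el
  apply List.ext_getElem (by simp [hlen])
  intro i' hi1 hi2
  have hi' : i' < l.length := by simpa using hi1
  have hrowlen : (Matrix_Matcher_alt l em el)[i'].length = l.length :=
    hrows _ (List.getElem_mem hi2)
  rw [List.getElem_map]
  apply List.ext_getElem (by simp [hrowlen])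
  intro j' hj1 hj2
  have hj' : j' < l.length := hrowlen ▸ hj2
  have hcell := hA i' hi' j' hj'
  unfold gM at hcell
  rw [List.getElem?_eq_getElem hi2, Option.bind_some,
      List.getElem?_eq_getElem (by omega : j' < (Matrix_Matcher_alt l em el)[i'].length)] at hcell
  rw [List.getElem_map]
  injection hcell with hinj
  exact hinj.symm
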